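-- pv_equiv track=rewrite | github.com/shadowsushi/Advent-of-Code-Solutions | 2025/4_printing_department/printing.py | get_shelf_comparisons
-- ===== SOURCE A (Python) =====
-- def get_shelf_comparisons(shelves: list):
--     '''
--     Docstring for count_accessible_rolls
--
--     :param shelves: Shelves as an array of strings
--     :param paper_limit: Maximum number of adjacent rolls such that the roll is still accessible by forklift
--     '''
--     # Create a list for all the comparisons between previous shelf and next shelf
--     list_of_shelf_comparisons = []
--
--     for i in range(len(shelves)):
--         # Get previous, current, and next shelf
--         previous_shelf = shelves[i - 1] if i > 0 else None
--         current_shelf = shelves[i]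
--         next_shelf = shelves[i + 1] if i < len(shelves) - 1 else None
--
--         # Append shelves to current comparison
--         current_shelf_comparison = []
--         current_shelf_comparison.append(previous_shelf)
--         current_shelf_comparison.append(current_shelf)
--         current_shelf_comparison.append(next_shelf)
--
--         # Append current comparison to list of comparisons
--         list_of_shelf_comparisons.append(current_shelf_comparison)
--
--     return list_of_shelf_comparisons
-- ===== SOURCE B (Python) =====
-- def get_shelf_comparisons(shelves: list):
--     prevs = [None] + shelves[:-1]
--     nxts = shelves[1:] + [None]
--     return [list(t) for t in zip(prevs, shelves, nxts)]
-- ===== Notes on version B (the rewrite author's own statement) =====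
-- stated objective: idiomatic
-- what changed: Replaced the index loop with boundary conditionals by zipping three aligned sequences (None-padded shifted copies of the input), so each triple is produced by parallel consumption with no index arithmetic.
import Mathlib
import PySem

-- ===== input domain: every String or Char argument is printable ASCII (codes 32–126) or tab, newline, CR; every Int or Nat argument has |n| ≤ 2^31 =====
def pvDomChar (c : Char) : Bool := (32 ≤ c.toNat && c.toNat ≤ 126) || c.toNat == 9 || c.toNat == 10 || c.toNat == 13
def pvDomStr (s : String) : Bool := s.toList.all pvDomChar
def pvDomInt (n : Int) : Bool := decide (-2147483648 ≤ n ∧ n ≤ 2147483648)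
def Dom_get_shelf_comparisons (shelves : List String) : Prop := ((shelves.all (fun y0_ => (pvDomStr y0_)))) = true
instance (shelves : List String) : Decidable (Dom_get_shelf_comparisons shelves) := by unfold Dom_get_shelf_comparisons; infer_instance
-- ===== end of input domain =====

-- B replaces A's index loop with boundary conditionals by zipping three None-padded shifted
-- copies of the input (more idiomatic; same cost).

-- ===== PORT A =====
def get_shelf_comparisons (shelves : List String) : List (List (Option String)) :=
  (PySem.List.pyRange 0 (shelves.length : Int) 1).foldl (fun list_of_shelf_comparisons i =>
    let previous_shelf : Option String :=
      if 0 < i then PySem.List.pyGet? shelves (i - 1) else none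
    let current_shelf : Option String := PySem.List.pyGet? shelves i
    let next_shelf : Option String :=
      if i < (shelves.length : Int) - 1 then PySem.List.pyGet? shelves (i + 1) else none
    list_of_shelf_comparisons ++ [[previous_shelf, current_shelf, next_shelf]]) []

-- ===== PORT B =====
def get_shelf_comparisons_alt (shelves : List String) : List (List (Option String)) :=
  let prevs : List (Option String) :=
    none :: (PySem.List.slice shelves none (some (-1))).map some        -- [None] + shelves[:-1]
  let nxts : List (Option String) :=
    (PySem.List.slice shelves (some 1) none).map some ++ [none]         -- shelves[1:] + [None]
  (prevs.zip ((shelves.map some).zip nxts)).map (fun t => [t.1, t.2.1, t.2.2])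

-- ===== PRECONDITION & SPEC =====
def Spec_get_shelf_comparisons (shelves : List String) (out : List (List (Option String))) : Prop := out = get_shelf_comparisons_alt shelves
instance (shelves : List String) (out : List (List (Option String))) : Decidable (Spec_get_shelf_comparisons shelves out) := by unfold Spec_get_shelf_comparisons; infer_instance

-- ===== CLAIM (what is proved, stated in full; the proofs are below) =====
def Claim_equal_get_shelf_comparisons : Prop := ∀ (shelves : List String), Dom_get_shelf_comparisons shelves → Spec_get_shelf_comparisons shelves (get_shelf_comparisons shelves)

-- ===== LEMMAS AND PROOFS =====

theorem pv_A_eq_map (shelves : List String) :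
    get_shelf_comparisons shelves =
      (List.range shelves.length).map (fun (k : Nat) =>
        [if 0 < (k : Int) then PySem.List.pyGet? shelves ((k : Int) - 1) else none,
         PySem.List.pyGet? shelves (k : Int),
         if (k : Int) < (shelves.length : Int) - 1 then PySem.List.pyGet? shelves ((k : Int) + 1) else none]) := by
  unfold get_shelf_comparisons
  rw [PySem.List.foldl_append_singleton_eq_map, PySem.List.pyRange_one, List.map_map]
  rw [List.nil_append]
  simp only [Int.sub_zero, Int.toNat_natCast]
  refine List.map_congr_left fun x _ => ?_
  norm_num

theorem pv_len_alt (shelves : List String) :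
    (get_shelf_comparisons_alt shelves).length = shelves.length := by
  unfold get_shelf_comparisons_alt
  simp [PySem.List.slice_to_neg_one, PySem.List.slice_from_one]
  omega

theorem pv_prev (xs : List String) (k : Nat) (hk : k < xs.length) :
    (if 0 < (k : Int) then PySem.List.pyGet? xs ((k : Int) - 1) else none) =
      (none :: xs.dropLast.map some)[k]'(by simp; omega) := by
  cases k with
  | zero => simp
  | succ j =>
      have hj : j < xs.dropLast.length := by simp; omega
      rw [if_pos (by positivity)]
      have hcast : ((j + 1 : Nat) : Int) - 1 = (j : Int) := by push_cast; ring
      rw [hcast, PySem.List.pyGet?_natCast]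
      simp [List.getElem_dropLast, List.getElem?_eq_getElem (by omega : j < xs.length)]

theorem pv_next (xs : List String) (k : Nat) (hk : k < xs.length) :
    (if (k : Int) < (xs.length : Int) - 1 then PySem.List.pyGet? xs ((k : Int) + 1) else none) =
      (xs.tail.map some ++ [none])[k]'(by simp; omega) := by
  by_cases hlt : k + 1 < xs.length
  · rw [if_pos (by omega)]
    have hcast : ((k : Int)) + 1 = ((k + 1 : Nat) : Int) := by push_cast; ring
    rw [hcast, PySem.List.pyGet?_natCast,
        List.getElem_append_left (by simp; omega)]
    simp [List.getElem_tail, List.getElem?_eq_getElem hlt]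
  · rw [if_neg (by omega), List.getElem_append_right (by simp; omega)]
    simp

-- ===== VERDICT (by name: the statement is the Claim_ definition above) =====
theorem get_shelf_comparisons_spec : Claim_equal_get_shelf_comparisons := by
  intro shelves _
  unfold Spec_get_shelf_comparisons
  rw [pv_A_eq_map]
  apply List.ext_getElem
  · rw [pv_len_alt]; simp
  · intro k h1 h2
    rw [pv_len_alt] at h2
    simp only [List.getElem_map, List.getElem_range]
    unfold get_shelf_comparisons_alt
    simp only [PySem.List.slice_to_neg_one, PySem.List.slice_from_one,
               List.getElem_map, List.getElem_zip]
    rw [← pv_prev shelves k h2, ← pv_next shelves k h2,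
        PySem.List.pyGet?_natCast, List.getElem?_eq_getElem h2]
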